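-- pv_equiv track=rewrite | github.com/LithiumH/cs224u-final-project | convert.py | check_strictly_increasing
-- ===== SOURCE A (Python) =====
-- def check_strictly_increasing(nested_sequence):
--     counter = 0
--     for sequence in nested_sequence:
--         for i in sequence:
--             if i != counter:
--                 return False
--             counter += 1
--     return True
-- ===== SOURCE B (Python) =====
-- def check_strictly_increasing(nested_sequence):
--     flat = [x for seq in nested_sequence for x in seq]
--     if not flat:
--         return True
--     return flat[0] == 0 and all(b - a == 1 for a, b in zip(flat, flat[1:]))
-- ===== Notes on version B (the rewrite author's own statement) =====
-- stated objective: alternative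
-- what changed: B replaces A's global running counter with a local characterization: the flattened sequence is 0,1,2,... iff it is empty or starts at 0 and every adjacent pair differs by exactly 1, checked via zip over consecutive pairs.
import Mathlib
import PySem

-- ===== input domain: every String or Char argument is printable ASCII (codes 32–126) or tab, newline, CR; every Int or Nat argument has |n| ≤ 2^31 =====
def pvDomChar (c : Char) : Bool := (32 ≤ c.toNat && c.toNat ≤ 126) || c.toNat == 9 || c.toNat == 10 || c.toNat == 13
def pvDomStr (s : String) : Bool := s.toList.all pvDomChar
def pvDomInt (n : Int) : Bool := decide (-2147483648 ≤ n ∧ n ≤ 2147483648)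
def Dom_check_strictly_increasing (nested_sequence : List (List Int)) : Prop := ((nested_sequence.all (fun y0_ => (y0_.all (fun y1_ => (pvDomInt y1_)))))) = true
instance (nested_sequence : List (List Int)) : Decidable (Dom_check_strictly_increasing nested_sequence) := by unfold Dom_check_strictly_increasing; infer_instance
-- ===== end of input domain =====

-- B checks a local successor property (starts at 0, each adjacent pair differs by 1) instead of A's global running counter. Objective: alternative.

-- ===== PORT A =====
-- inner loop of A: walk one sequence against the counter; none = early `return False`
def csiInner : List Int → Int → Option Int
  | [], c => some c
  | i :: t, c => if i ≠ c then none else csiInner t (c + 1)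

-- outer loop of A over the sequences
def csiOuter : List (List Int) → Int → Bool
  | [], _ => true
  | s :: rest, c =>
    match csiInner s c with
    | none => false
    | some c' => csiOuter rest c'

def check_strictly_increasing (nested_sequence : List (List Int)) : Bool :=
  csiOuter nested_sequence 0

-- ===== PORT B =====
def check_strictly_increasing_alt (nested_sequence : List (List Int)) : Bool :=
  match nested_sequence.flatMap (fun seq => seq) with
  | [] => true
  | x :: rest => (x == 0) && (((x :: rest).zip rest).all (fun p => p.2 - p.1 == 1))

-- ===== PRECONDITION & SPEC =====
def Spec_check_strictly_increasing (nested_sequence : List (List Int)) (out : Bool) : Prop := out = check_strictly_increasing_alt nested_sequence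
instance (nested_sequence : List (List Int)) (out : Bool) : Decidable (Spec_check_strictly_increasing nested_sequence out) := by unfold Spec_check_strictly_increasing; infer_instance

-- ===== CLAIM =====
def Claim_equal_check_strictly_increasing : Prop := ∀ (nested_sequence : List (List Int)), Dom_check_strictly_increasing nested_sequence → Spec_check_strictly_increasing nested_sequence (check_strictly_increasing nested_sequence)

-- ===== LEMMAS AND PROOFS =====

-- A's counter walk on a single flat list
def csiFlat : List Int → Int → Bool
  | [], _ => true
  | i :: t, c => if i ≠ c then false else csiFlat t (c + 1)

theorem csiFlat_append (s t : List Int) (c : Int) :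
    csiFlat (s ++ t) c = match csiInner s c with
      | none => false
      | some c' => csiFlat t c' := by
  induction s generalizing c with
  | nil => simp [csiInner]
  | cons i s ih =>
    simp only [List.cons_append, csiFlat, csiInner]
    split_ifs with h
    · rfl
    · exact ih (c + 1)

theorem outer_eq_flat (ns : List (List Int)) (c : Int) :
    csiOuter ns c = csiFlat (ns.flatMap (fun seq => seq)) c := by
  induction ns generalizing c with
  | nil => simp [csiOuter, csiFlat]
  | cons s rest ih =>
    simp only [csiOuter, List.flatMap_cons, csiFlat_append]
    cases h : csiInner s c with
    | none => rfl
    | some c' => exact ih c'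

-- the adjacency check of B on a flat list
def csiAdj (l : List Int) : Bool := (l.zip l.tail).all (fun p => p.2 - p.1 == 1)

theorem csiFlat_eq_adj (l : List Int) (c : Int) :
    csiFlat l c = match l with
      | [] => true
      | x :: _ => (x == c) && csiAdj l := by
  induction l generalizing c with
  | nil => rfl
  | cons x t ih =>
    have hx : csiFlat (x :: t) c = ((x == c) && csiFlat t (c + 1)) := by
      simp only [csiFlat]
      by_cases h : x = c <;> simp [h]
    rw [hx, ih (c + 1)]
    cases t with
    | nil => simp [csiAdj]
    | cons y t' =>
      simp only [csiAdj, List.tail, List.zip_cons_cons, List.all_cons]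
      by_cases h : x = c
      · subst h
        have hb : (y == x + 1) = (y - x == 1) := by
          by_cases hy : y = x + 1
          · have h1 : y - x = 1 := by omega
            simp [hy]
          · have h1 : y - x ≠ 1 := by omega
            simp [hy, h1]
        rw [hb]
      · have hb : (x == c) = false := by simp [h]
        rw [hb, Bool.false_and, Bool.false_and]

-- ===== VERDICT =====
theorem check_strictly_increasing_spec : Claim_equal_check_strictly_increasing := by
  intro ns _
  unfold Spec_check_strictly_increasing check_strictly_increasing check_strictly_increasing_alt
  rw [outer_eq_flat, csiFlat_eq_adj]
  cases h : ns.flatMap (fun seq => seq) with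
  | nil => rfl
  | cons x rest => simp [csiAdj]
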